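-- pv_equiv track=rewrite | github.com/WendyMYALE/SublinearArmstrongTable | FunctionSet.py | transversal
-- ===== SOURCE A (Python) =====
-- def transversal(l1, l2):
--     """
--     :param l1: Original list
--     :param l2: Transversal list
--     """
--
--     l = l1.copy()
--     newl = []
--     if len(l2) == 0:
--         newl = [[x] for x in l[0]]
--         l.remove(l[0])
--     else:
--         for i in range(len(l2)):
--             if l[0][0] in l2[i]:
--                 newl.append(l2[i])
--             else:
--                 newl.append(l2[i] + [l[0][0]])
--             for j in range(len(l[0]) - 1):
--                 if l[0][j + 1] in l2[i]:
--                     newl.append(l2[i])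
--                 else:
--                     newl.append(l2[i] + [l[0][j + 1]])
--
--         l.remove(l[0])
--
--     if len(l) == 0:
--         newsl = []
--         for s in newl:
--             newsl.append(''.join([str(elem) for elem in sorted(s)]))
--         return list(dict.fromkeys(newsl))
--     else:
--         l3 = transversal(l, newl)
--         return l3
-- ===== SOURCE B (Python) =====
-- # Iterative fold over the rows with flat comprehensions plus a one-pass
-- # seen-set dedup, instead of A's recursion with index loops and list mutation.
-- # An empty row can never be hit, so B rejects it up front (ValueError) instead
-- # of A's accidental behaviour (IndexError once partials exist, silent skip before).
--
-- def _step(current, row):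
--     if current:
--         return [p if e in p else p + [e] for p in current for e in row]
--     return [[e] for e in row]
--
-- def _key(p):
--     return ''.join(map(str, sorted(p)))
--
-- def transversal(l1, l2):
--     """
--     :param l1: Original list
--     :param l2: Transversal list
--     """
--     if any(not row for row in l1):
--         raise ValueError("transversal: an empty row cannot be hit")
--     current = l2
--     for row in l1:
--         current = _step(current, row)
--     out, seen = [], set()
--     for p in current:
--         k = _key(p)
--         if k not in seen:
--             seen.add(k)
--             out.append(k)
--     return out
-- ===== Notes on version B (the rewrite author's own statement) =====
-- stated objective: simpler
-- what changed: A's recursion with index-based loops (range(len(l2)), range(len(l[0])-1)), list copy/remove mutation and a first-element special case is replaced by an up-front row validation, a single left fold of a flat 'extend each partial by each row element' step over the rows, and a one-pass seen-set dedup of the sorted-join keys.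
-- outside the precondition, e.g. on transversal([[], [1]], []): A returns ['1'], B raises ValueError; on transversal([[], [], [2, 3]], []): A returns ['2', '3'], B raises ValueError
import Mathlib
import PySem

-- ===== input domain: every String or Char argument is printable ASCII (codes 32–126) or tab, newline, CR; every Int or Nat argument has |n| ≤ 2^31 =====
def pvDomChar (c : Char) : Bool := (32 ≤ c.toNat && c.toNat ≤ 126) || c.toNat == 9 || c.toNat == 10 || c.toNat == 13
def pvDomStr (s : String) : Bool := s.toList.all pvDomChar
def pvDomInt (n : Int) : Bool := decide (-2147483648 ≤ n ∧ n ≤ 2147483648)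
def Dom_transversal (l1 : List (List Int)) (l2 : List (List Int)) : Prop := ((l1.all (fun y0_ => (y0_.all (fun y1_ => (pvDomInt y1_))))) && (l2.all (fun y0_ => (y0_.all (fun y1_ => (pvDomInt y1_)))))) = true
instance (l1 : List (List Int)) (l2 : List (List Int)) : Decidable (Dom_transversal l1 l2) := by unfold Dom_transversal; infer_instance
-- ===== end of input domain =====

-- B replaces A's recursion with index loops and list mutation by a single fold of a
-- flat "extend each partial by each row element" step plus a one-pass seen-set dedup (objective: simpler).


-- ===== PORT A =====
def transversal (l1 : List (List Int)) (l2 : List (List Int)) : List String :=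
  match l1 with
  | [] => []  -- Python: 'l[0]' raises IndexError here; excluded by Pre_transversal
  | row :: rest =>
    let newl : List (List Int) :=
      if l2.length = 0 then
        row.map (fun x => [x])
      else
        (PySem.List.pyRange 0 (l2.length : Int) 1).foldl (fun acc i =>
          let l2i := PySem.List.pyGetD l2 i []
          -- 'l[0][0]': pyGetD; Pre_transversal guarantees row ≠ [] in this branch
          let acc2 := if PySem.List.pyGetD row 0 0 ∈ l2i then acc ++ [l2i]
                      else acc ++ [l2i ++ [PySem.List.pyGetD row 0 0]]
          (PySem.List.pyRange 0 ((row.length : Int) - 1) 1).foldl (fun acc3 j =>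
            if PySem.List.pyGetD row (j + 1) 0 ∈ l2i then acc3 ++ [l2i]
            else acc3 ++ [l2i ++ [PySem.List.pyGetD row (j + 1) 0]]) acc2) []
    if rest.length = 0 then
      let newsl := newl.foldl (fun acc s =>
        acc ++ [PySem.Str.join "" ((PySem.List.sorted s (fun x => x) false).map PySem.Int.toStr)]) []
      PySem.List.dedup newsl
    else
      transversal rest newl

-- ===== PORT B =====
def pvStep (current : List (List Int)) (row : List Int) : List (List Int) :=
  if current.isEmpty = false then
    current.flatMap (fun p => row.map (fun e => if e ∈ p then p else p ++ [e]))
  else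
    row.map (fun e => [e])

def pvKey (p : List Int) : String :=
  PySem.Str.join "" ((PySem.List.sorted p (fun x => x) false).map PySem.Int.toStr)

def transversal_alt (l1 : List (List Int)) (l2 : List (List Int)) : List String :=
  -- Python B raises ValueError here (an empty row can never be hit); excluded by Pre_transversal
  if l1.any (fun row => row.isEmpty) then [] else
  let current := l1.foldl pvStep l2
  (current.foldl (fun (acc : List String × PySem.Set String) p =>
      let k := pvKey p
      if k ∈ acc.2 then acc else (acc.1 ++ [k], PySem.Set.add acc.2 k))
    ([], PySem.Set.empty)).1

-- ===== PRECONDITION & SPEC =====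
-- Pre_ excludes the inputs on which A raises IndexError (empty l1, or an empty row met while
-- the partial list is nonempty) and, since B rejects every empty row with ValueError, also the
-- inputs with leading empty rows and l2 = [] that A only survives by accident of its l2-empty
-- branch (there A returns a value, B raises; see the cites in claim.json).
def Pre_transversal (l1 : List (List Int)) (l2 : List (List Int)) : Prop :=
  l1 ≠ [] ∧ ∀ r ∈ l1, r ≠ []
instance (l1 : List (List Int)) (l2 : List (List Int)) : Decidable (Pre_transversal l1 l2) := by
  unfold Pre_transversal; infer_instance

def pvWitness_transversal : List (List Int) × List (List Int) := ([[1, 2], [2, 3]], [])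

def Spec_transversal (l1 : List (List Int)) (l2 : List (List Int)) (out : List String) : Prop := out = transversal_alt l1 l2
instance (l1 : List (List Int)) (l2 : List (List Int)) (out : List String) : Decidable (Spec_transversal l1 l2 out) := by unfold Spec_transversal; infer_instance

-- ===== CLAIM (what is proved, stated in full; the proofs are below) =====
def Claim_equal_transversal : Prop := ∀ (l1 : List (List Int)) (l2 : List (List Int)), Dom_transversal l1 l2 → Pre_transversal l1 l2 → Spec_transversal l1 l2 (transversal l1 l2)

-- ===== LEMMAS AND PROOFS =====

-- the dedup loop of B equals PySem.List.dedup of the keys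
lemma pvDedupLoop (xs : List (List Int)) (s : PySem.Set String) :
    (xs.foldl (fun (acc : List String × PySem.Set String) p =>
        let k := pvKey p
        if k ∈ acc.2 then acc else (acc.1 ++ [k], PySem.Set.add acc.2 k)) (s, s)).1
      = xs.foldl (fun t p => PySem.Set.add t (pvKey p)) s := by
  induction xs generalizing s with
  | nil => rfl
  | cons p xs ih =>
    simp only [List.foldl_cons]
    by_cases h : pvKey p ∈ s
    · simp [h, ih]
    · simp [h, ih (s ++ [pvKey p])]

lemma pvAltDedup (xs : List (List Int)) :
    (xs.foldl (fun (acc : List String × PySem.Set String) p =>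
        let k := pvKey p
        if k ∈ acc.2 then acc else (acc.1 ++ [k], PySem.Set.add acc.2 k))
      ([], PySem.Set.empty)).1 = PySem.List.dedup (xs.map pvKey) := by
  rw [show (([], PySem.Set.empty) : List String × PySem.Set String) = (([] : List String), ([] : PySem.Set String)) from rfl]
  rw [pvDedupLoop xs []]
  rw [PySem.List.dedup_eq_ofList, PySem.Set.ofList_eq_foldl, List.foldl_map]

-- index-shifted inner loop of A is a fold over the tail of the row
lemma pvRangeAux {β : Type} (es : List Int) (e0 : Int) (f : β → Int → β) :
    ∀ (n : Nat), n ≤ es.length → ∀ (init : β),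
      (List.range n).foldl
          (fun acc (k : Nat) => f acc (PySem.List.pyGetD (e0 :: es) ((k : Int) + 1) 0)) init
        = (es.take n).foldl f init := by
  intro n
  induction n with
  | zero => intro _ init; simp
  | succ n ih =>
    intro hn init
    rw [List.range_succ, List.foldl_append, ih (by omega) init]
    have hcast : ((n : Int) + 1) = ((n + 1 : Nat) : Int) := by push_cast; ring
    rw [List.foldl_cons, List.foldl_nil, hcast, PySem.List.pyGetD_natCast]
    have htake : es.take (n + 1) = es.take n ++ [es[n]] := by
      rw [List.take_add_one]; simp [List.getElem?_eq_getElem (by omega : n < es.length)]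
    rw [htake, List.foldl_append, List.foldl_cons, List.foldl_nil]
    have hgd : (e0 :: es).getD (n + 1) 0 = es[n] := by
      rw [List.getD_cons_succ]
      exact List.getD_eq_getElem _ _ (by omega)
    rw [hgd]

lemma pvRangeGetD {β : Type} (es : List Int) (e0 : Int) (f : β → Int → β) (init : β) :
    (PySem.List.pyRange 0 ((es.length : Int)) 1).foldl
        (fun acc j => f acc (PySem.List.pyGetD (e0 :: es) (j + 1) 0)) init
      = es.foldl f init := by
  rw [PySem.List.pyRange_zero_natCast, List.foldl_map]
  simpa using pvRangeAux es e0 f es.length (le_refl _) init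

-- A's newl in the else-branch equals B's step, given a nonempty row
lemma pvStepEq (l2 : List (List Int)) (row : List Int) (hl2 : l2 ≠ []) (hrow : row ≠ []) :
    (PySem.List.pyRange 0 (l2.length : Int) 1).foldl (fun acc i =>
        let l2i := PySem.List.pyGetD l2 i []
        let acc2 := if PySem.List.pyGetD row 0 0 ∈ l2i then acc ++ [l2i]
                    else acc ++ [l2i ++ [PySem.List.pyGetD row 0 0]]
        (PySem.List.pyRange 0 ((row.length : Int) - 1) 1).foldl (fun acc3 j =>
          if PySem.List.pyGetD row (j + 1) 0 ∈ l2i then acc3 ++ [l2i]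
          else acc3 ++ [l2i ++ [PySem.List.pyGetD row (j + 1) 0]]) acc2) []
      = pvStep l2 row := by
  obtain ⟨e0, es, rfl⟩ : ∃ e0 es, row = e0 :: es := by
    cases row with
    | nil => exact absurd rfl hrow
    | cons a b => exact ⟨a, b, rfl⟩
  have hlen : (((e0 :: es).length : Int) - 1) = ((es.length : Int)) := by
    simp
  rw [PySem.List.foldl_pyRange_zero_pyGetD' l2 []
    (f := fun acc l2i =>
      (PySem.List.pyRange 0 (((e0 :: es).length : Int) - 1) 1).foldl (fun acc3 j =>
          if PySem.List.pyGetD (e0 :: es) (j + 1) 0 ∈ l2i then acc3 ++ [l2i]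
          else acc3 ++ [l2i ++ [PySem.List.pyGetD (e0 :: es) (j + 1) 0]])
        (if PySem.List.pyGetD (e0 :: es) 0 0 ∈ l2i then acc ++ [l2i]
         else acc ++ [l2i ++ [PySem.List.pyGetD (e0 :: es) 0 0]]))]
  have hstep : ∀ (acc : List (List Int)) (l2i : List Int), l2i ∈ l2 →
      (PySem.List.pyRange 0 (((e0 :: es).length : Int) - 1) 1).foldl (fun acc3 j =>
          if PySem.List.pyGetD (e0 :: es) (j + 1) 0 ∈ l2i then acc3 ++ [l2i]
          else acc3 ++ [l2i ++ [PySem.List.pyGetD (e0 :: es) (j + 1) 0]])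
        (if PySem.List.pyGetD (e0 :: es) 0 0 ∈ l2i then acc ++ [l2i]
         else acc ++ [l2i ++ [PySem.List.pyGetD (e0 :: es) 0 0]])
      = acc ++ (e0 :: es).map (fun e => if e ∈ l2i then l2i else l2i ++ [e]) := by
    intro acc l2i _
    rw [hlen, pvRangeGetD es e0
      (f := fun acc3 e => if e ∈ l2i then acc3 ++ [l2i] else acc3 ++ [l2i ++ [e]])]
    have : ∀ (a : List (List Int)),
        es.foldl (fun acc3 e => if e ∈ l2i then acc3 ++ [l2i] else acc3 ++ [l2i ++ [e]]) a
          = a ++ es.map (fun e => if e ∈ l2i then l2i else l2i ++ [e]) := by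
      intro a
      have hcg : es.foldl (fun acc3 e => if e ∈ l2i then acc3 ++ [l2i] else acc3 ++ [l2i ++ [e]]) a
          = es.foldl (fun acc3 e => acc3 ++ [if e ∈ l2i then l2i else l2i ++ [e]]) a := by
        apply PySem.List.foldl_congr_mem
        intro acc3 e _
        split_ifs <;> rfl
      rw [hcg, PySem.List.foldl_append_singleton_eq_map]
    rw [this]
    have h0 : PySem.List.pyGetD (e0 :: es) 0 0 = e0 := PySem.List.pyGetD_zero_cons e0 es 0
    rw [h0]
    simp only [List.map_cons]
    split_ifs <;> simp
  refine Eq.trans (PySem.List.foldl_congr_mem' l2 _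
    (fun acc l2i => acc ++ (e0 :: es).map (fun e => if e ∈ l2i then l2i else l2i ++ [e]))
    ([] : List (List Int))
    (fun l2i hmem acc => hstep acc l2i hmem)) ?_
  rw [PySem.List.foldl_append_eq_flatMap]
  have : l2.isEmpty = false := by
    cases l2 with
    | nil => exact absurd rfl hl2
    | cons _ _ => rfl
  simp [pvStep, this]

-- unfolding of A at a cons, with newl already rewritten to pvStep
lemma pvAeq (row : List Int) (rest l2 : List (List Int))
    (h : l2 = [] ∨ row ≠ []) :
    transversal (row :: rest) l2
      = if rest.length = 0 then
          PySem.List.dedup ((pvStep l2 row).map pvKey)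
        else transversal rest (pvStep l2 row) := by
  have hnewl :
      (if l2.length = 0 then row.map (fun x => [x])
       else (PySem.List.pyRange 0 (l2.length : Int) 1).foldl (fun acc i =>
          let l2i := PySem.List.pyGetD l2 i []
          let acc2 := if PySem.List.pyGetD row 0 0 ∈ l2i then acc ++ [l2i]
                      else acc ++ [l2i ++ [PySem.List.pyGetD row 0 0]]
          (PySem.List.pyRange 0 ((row.length : Int) - 1) 1).foldl (fun acc3 j =>
            if PySem.List.pyGetD row (j + 1) 0 ∈ l2i then acc3 ++ [l2i]
            else acc3 ++ [l2i ++ [PySem.List.pyGetD row (j + 1) 0]]) acc2) [])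
      = pvStep l2 row := by
    cases l2 with
    | nil => simp [pvStep]
    | cons q qs =>
      rcases h with h | h
      · exact absurd h (by simp)
      · rw [if_neg (by simp)]
        exact pvStepEq (q :: qs) row (by simp) h
  show (let newl := _; if rest.length = 0 then _ else transversal rest newl) = _
  rw [hnewl]
  by_cases hr : rest.length = 0
  · rw [if_pos hr, if_pos hr, PySem.List.foldl_append_singleton_eq_map, List.nil_append]
    rfl
  · rw [if_neg hr, if_neg hr]

-- proof-side view of B: the fold-plus-dedup core behind the validation guard
def pvAltCore (l1 l2 : List (List Int)) : List String :=
  ((l1.foldl pvStep l2).foldl (fun (acc : List String × PySem.Set String) p =>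
      let k := pvKey p
      if k ∈ acc.2 then acc else (acc.1 ++ [k], PySem.Set.add acc.2 k))
    ([], PySem.Set.empty)).1

lemma pvAltEqCore (l1 l2 : List (List Int)) (h : l1.any (fun row => row.isEmpty) = false) :
    transversal_alt l1 l2 = pvAltCore l1 l2 := by
  simp [transversal_alt, h, pvAltCore]

lemma pvCoreCons (row : List Int) (rest l2 : List (List Int)) :
    pvAltCore (row :: rest) l2 = pvAltCore rest (pvStep l2 row) := rfl

lemma pvCoreNil (cur : List (List Int)) :
    pvAltCore [] cur = PySem.List.dedup (cur.map pvKey) := pvAltDedup cur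

lemma pvMain : ∀ (l1 l2 : List (List Int)), Pre_transversal l1 l2 →
    transversal l1 l2 = transversal_alt l1 l2 := by
  intro l1
  induction l1 with
  | nil => intro l2 hpre; exact absurd rfl hpre.1
  | cons row rest ih =>
    intro l2 hpre
    obtain ⟨-, hrows⟩ := hpre
    have hrow : row ≠ [] := hrows row (List.mem_cons_self)
    have hguard : (row :: rest).any (fun r => r.isEmpty) = false := by
      rw [List.any_eq_false]
      intro r hr
      simpa [List.isEmpty_iff] using hrows r hr
    rw [pvAeq row rest l2 (Or.inr hrow), pvAltEqCore _ _ hguard, pvCoreCons]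
    cases rest with
    | nil =>
      rw [if_pos (by simp), pvCoreNil]
    | cons r rs =>
      rw [if_neg (by simp)]
      have hguard' : (r :: rs).any (fun x => x.isEmpty) = false := by
        rw [List.any_eq_false]
        intro x hx
        simpa [List.isEmpty_iff] using hrows x (List.mem_cons_of_mem _ hx)
      rw [ih (pvStep l2 row) ⟨by simp, fun x hx => hrows x (List.mem_cons_of_mem _ hx)⟩,
        pvAltEqCore _ _ hguard']

-- ===== VERDICT (by name: the statement is the Claim_ definition above) =====
theorem transversal_spec : Claim_equal_transversal := by
  intro l1 l2 _ hpre
  show transversal l1 l2 = transversal_alt l1 l2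
  exact pvMain l1 l2 hpre
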